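-- pv_equiv track=rewrite | github.com/minipasila/WinampRPC-LastFM | main.py | get_largest_image
-- ===== SOURCE A (Python) =====
-- def get_largest_image(images):
--     """Extract the largest image URL from Last.FM image array"""
--     if not images:
--         return None
--
--     # Last.FM provides images in different sizes, get the largest one
--     size_priority = ['extralarge', 'large', 'medium', 'small']
--
--     for size in size_priority:
--         for img in images:
--             if img.get('size') == size and img.get('#text'):
--                 return img['#text']
--
--     # Fallback to any available image
--     for img in images:
--         if img.get('#text'):
--             return img['#text']
--
--     return None
-- ===== SOURCE B (Python) =====
-- def get_largest_image(images):
--     """Extract the largest image URL from Last.FM image array"""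
--     best = {}
--     fallback = None
--     for img in images:
--         url = img.get('#text')
--         if url:
--             size = img.get('size')
--             if size not in best:
--                 best[size] = url
--             if fallback is None:
--                 fallback = url
--     for size in ['extralarge', 'large', 'medium', 'small']:
--         if size in best:
--             return best[size]
--     return fallback
-- ===== Notes on version B (the rewrite author's own statement) =====
-- stated objective: simpler
-- what changed: Replaces A's four successive scans of the image list (one per priority size) plus a fifth fallback scan with a single indexing pass that records the first truthy-'#text' url per size in a dict and the first truthy url overall, followed by one lookup pass over the fixed priority list.
import Mathlib
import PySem

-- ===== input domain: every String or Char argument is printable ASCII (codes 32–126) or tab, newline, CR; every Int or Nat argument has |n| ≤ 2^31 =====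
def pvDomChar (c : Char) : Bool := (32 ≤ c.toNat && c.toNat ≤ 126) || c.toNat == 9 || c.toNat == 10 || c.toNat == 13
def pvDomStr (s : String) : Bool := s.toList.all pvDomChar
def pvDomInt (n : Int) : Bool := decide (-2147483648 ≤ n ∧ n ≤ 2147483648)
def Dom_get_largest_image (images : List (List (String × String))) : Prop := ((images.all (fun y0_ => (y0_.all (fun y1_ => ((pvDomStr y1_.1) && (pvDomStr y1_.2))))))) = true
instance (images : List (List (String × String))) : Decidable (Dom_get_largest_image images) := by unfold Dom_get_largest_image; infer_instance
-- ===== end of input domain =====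

-- B replaces A's four successive priority scans plus a fallback scan with one
-- dict-building pass over the images followed by one lookup pass over the
-- priority list ('simpler': same result, different traversal structure).

-- shared helper: img.get(key) on the association-list dict (first match, none = missing)
def pvGet (img : List (String × String)) (key : String) : Option String :=
  (PySem.Dict.mk img).get? key

-- Python truthiness of an optional string: present and non-empty
def pvTruthy : Option String → Bool
  | some u => !(u == "")
  | none => false

-- ===== PORT A =====
-- inner 'for img in images' of A, generalized over the looked-up size key
def pvScanKey (k : Option String) : List (List (String × String)) → Option String
  | [] => none
  | img :: rest =>
    if (pvGet img "size" == k) && pvTruthy (pvGet img "#text") then pvGet img "#text"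
    else pvScanKey k rest

-- A's fallback loop: first image with truthy '#text'
def pvFallbackScan : List (List (String × String)) → Option String
  | [] => none
  | img :: rest =>
    if pvTruthy (pvGet img "#text") then pvGet img "#text" else pvFallbackScan rest

-- A's outer 'for size in size_priority' loop
def pvPriorityLoop (images : List (List (String × String))) : List String → Option String
  | [] => pvFallbackScan images
  | s :: rest =>
    match pvScanKey (some s) images with
    | some u => some u
    | none => pvPriorityLoop images rest

def get_largest_image (images : List (List (String × String))) : Option String :=
  if images = [] then none
  else pvPriorityLoop images ["extralarge", "large", "medium", "small"]

-- ===== PORT B =====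
-- one step of B's indexing pass: state = (best : size -> first truthy url, fallback)
def pvStep (st : PySem.Dict (Option String) String × Option String)
    (img : List (String × String)) : PySem.Dict (Option String) String × Option String :=
  match pvGet img "#text" with
  | some u =>
    if u == "" then st
    else
      let sz := pvGet img "size"
      ((if st.1.contains sz then st.1 else st.1.insert sz u),
       (match st.2 with | none => some u | some f => some f))
  | none => st

-- B's lookup pass over the priority list
def pvPick (best : PySem.Dict (Option String) String) (fb : Option String) :
    List String → Option String
  | [] => fb
  | s :: rest =>
    match best.get? (some s) with
    | some u => some u
    | none => pvPick best fb rest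

def get_largest_image_alt (images : List (List (String × String))) : Option String :=
  let st := images.foldl pvStep (PySem.Dict.empty, none)
  pvPick st.1 st.2 ["extralarge", "large", "medium", "small"]

-- ===== PRECONDITION & SPEC =====
def Spec_get_largest_image (images : List (List (String × String))) (out : Option String) : Prop := out = get_largest_image_alt images
instance (images : List (List (String × String))) (out : Option String) : Decidable (Spec_get_largest_image images out) := by unfold Spec_get_largest_image; infer_instance

-- ===== CLAIM (what is proved, stated in full; the proofs are below) =====
def Claim_equal_get_largest_image : Prop := ∀ (images : List (List (String × String))), Dom_get_largest_image images → Spec_get_largest_image images (get_largest_image images)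

-- ===== LEMMAS AND PROOFS =====

-- B's dict lookup after the fold = A's scan for that size key (first truthy match)
theorem pv_fold_get (images : List (List (String × String)))
    (d : PySem.Dict (Option String) String) (fb : Option String) (k : Option String) :
    ((images.foldl pvStep (d, fb)).1).get? k = (d.get? k).or (pvScanKey k images) := by
  induction images generalizing d fb with
  | nil => simp [pvScanKey]
  | cons img rest ih =>
    simp only [List.foldl_cons, pvScanKey]
    cases htxt : pvGet img "#text" with
    | none => simp [pvStep, htxt, pvTruthy, ih]
    | some u =>
      by_cases hu : u = ""
      · simp [pvStep, htxt, hu, pvTruthy, ih]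
      · by_cases hk : pvGet img "size" = k
        · subst hk
          have htr : pvTruthy (some u) = true := by simp [pvTruthy, hu]
          by_cases hc : d.contains (pvGet img "size")
          · obtain ⟨v, hv⟩ : ∃ v, d.get? (pvGet img "size") = some v := by
              have := PySem.Dict.contains_eq_isSome_get? (d := d) (k := pvGet img "size")
              rw [hc] at this
              exact Option.isSome_iff_exists.mp this.symm
            simp [pvStep, htxt, hu, hc, ih, htr, hv]
          · have hnone : d.get? (pvGet img "size") = none := by
              have := PySem.Dict.contains_eq_isSome_get? (d := d) (k := pvGet img "size")
              cases h : d.get? (pvGet img "size") with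
              | none => rfl
              | some v => rw [h] at this; simp [this] at hc
            simp [pvStep, htxt, hu, hc, ih, htr, hnone,
              PySem.Dict.get?_insert_self]
        · have hbeq : (pvGet img "size" == k) = false := by
            simp [hk]
          by_cases hc : d.contains (pvGet img "size")
          · simp [pvStep, htxt, hu, hc, ih, hbeq]
          · simp [pvStep, htxt, hu, hc, ih, hbeq,
              PySem.Dict.get?_insert_of_ne _ _ (Ne.symm hk)]
  
-- B's fallback after the fold = A's fallback scan (first truthy url)
theorem pv_fold_fb (images : List (List (String × String)))
    (d : PySem.Dict (Option String) String) (fb : Option String) :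
    (images.foldl pvStep (d, fb)).2 = fb.or (pvFallbackScan images) := by
  induction images generalizing d fb with
  | nil => simp [pvFallbackScan]
  | cons img rest ih =>
    simp only [List.foldl_cons, pvFallbackScan]
    cases htxt : pvGet img "#text" with
    | none => simp [pvStep, htxt, pvTruthy, ih]
    | some u =>
      by_cases hu : u = ""
      · simp [pvStep, htxt, hu, pvTruthy, ih]
      · cases fb with
        | none => simp [pvStep, htxt, hu, pvTruthy, ih]
        | some f => simp [pvStep, htxt, hu, pvTruthy, ih]

-- the two priority passes agree once the dict/fallback are characterized
theorem pv_pick_eq (images : List (List (String × String))) (prio : List String) :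
    pvPick (images.foldl pvStep (PySem.Dict.empty, none)).1
      (images.foldl pvStep (PySem.Dict.empty, none)).2 prio
      = pvPriorityLoop images prio := by
  induction prio with
  | nil => simp [pvPick, pvPriorityLoop, pv_fold_fb]
  | cons s rest ih =>
    simp only [pvPick, pvPriorityLoop, pv_fold_get, PySem.Dict.get?_empty, Option.or]
    cases pvScanKey (some s) images <;> simp [ih]

-- ===== VERDICT (by name: the statement is the Claim_ definition above) =====
theorem get_largest_image_spec : Claim_equal_get_largest_image := by
  intro images _
  unfold Spec_get_largest_image get_largest_image get_largest_image_alt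
  by_cases h : images = []
  · subst h; decide
  · simp only [h, if_false, pv_pick_eq]
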